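-- pv_equiv track=rewrite | github.com/Omvishesh/KnowledgeGraph | generate_table_metadata.py | detect_geographical_granularity
-- ===== SOURCE A (Python) =====
-- def detect_geographical_granularity(schema, sample_rows):
--     """
--     Detect geographical granularity from schema and sample data.
--
--     Args:
--         schema: List of (column_name, data_type) tuples
--         sample_rows: List of sampled row dictionaries
--
--     Returns:
--         String describing geographical granularity (e.g., "city", "district", "state", "national", "none")
--     """
--     geo_columns = []
--     for col_name, _ in schema:
--         col_lower = col_name.lower()
--         if any(keyword in col_lower for keyword in ['state', 'city', 'district', 'country', 'region', 'location']):
--             geo_columns.append(col_name)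
--
--     if not geo_columns:
--         return "national"
--
--     # Determine granularity based on column names
--     col_names_lower = [c.lower() for c, _ in schema]
--     if any('city' in c for c in col_names_lower):
--         return "city"
--     elif any('district' in c for c in col_names_lower):
--         return "district"
--     elif any('state' in c for c in col_names_lower):
--         return "state"
--     elif any('country' in c for c in col_names_lower):
--         return "country"
--
--     return "state"  # Default assumption for Indian economic data
-- ===== SOURCE B (Python) =====
-- KEYWORDS = ['state', 'city', 'district', 'country', 'region', 'location']
--
-- def detect_geographical_granularity(schema, sample_rows):
--     found = set()
--     for col_name, _ in schema:
--         col_lower = col_name.lower()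
--         for kw in KEYWORDS:
--             if kw in col_lower:
--                 found.add(kw)
--     if not found:
--         return "national"
--     if 'city' in found:
--         return "city"
--     if 'district' in found:
--         return "district"
--     if 'state' in found:
--         return "state"
--     if 'country' in found:
--         return "country"
--     return "state"
-- ===== Notes on version B (the rewrite author's own statement) =====
-- stated objective: alternative
-- what changed: Instead of A's gate pass plus up to four further full scans of the column list (one per granularity keyword), B makes a single pass that lowers each column name once and collects every matched keyword into a set, then decides by constant-time membership checks in priority order.
import Mathlib
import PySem

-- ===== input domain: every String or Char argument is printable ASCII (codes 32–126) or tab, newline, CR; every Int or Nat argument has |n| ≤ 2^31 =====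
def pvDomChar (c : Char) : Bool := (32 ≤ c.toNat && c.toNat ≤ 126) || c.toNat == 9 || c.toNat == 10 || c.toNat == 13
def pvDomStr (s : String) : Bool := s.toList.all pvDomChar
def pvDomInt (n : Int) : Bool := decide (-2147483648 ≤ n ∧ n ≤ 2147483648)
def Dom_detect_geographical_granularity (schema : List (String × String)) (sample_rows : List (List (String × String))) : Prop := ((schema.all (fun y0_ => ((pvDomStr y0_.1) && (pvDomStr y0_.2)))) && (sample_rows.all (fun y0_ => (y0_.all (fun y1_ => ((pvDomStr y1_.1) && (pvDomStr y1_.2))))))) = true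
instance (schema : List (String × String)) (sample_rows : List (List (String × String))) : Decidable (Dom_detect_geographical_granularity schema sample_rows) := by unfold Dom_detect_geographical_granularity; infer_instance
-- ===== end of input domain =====

-- B replaces A's repeated full scans of the column list with one pass that collects the
-- matched keywords in a set, followed by constant-size membership checks (objective: alternative).


-- ===== PORT A =====
def detect_geographical_granularity (schema : List (String × String)) (sample_rows : List (List (String × String))) : String :=
  -- geo_columns loop: append col_name when any keyword is a substring of col_name.lower()
  let geo_columns : List String := schema.foldl (fun acc p =>
    let col_lower := PySem.Str.lower p.1
    if (["state", "city", "district", "country", "region", "location"]).any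
        (fun keyword => PySem.Str.isIn keyword col_lower)
    then acc ++ [p.1] else acc) []
  if geo_columns = [] then "national"
  else
    let col_names_lower := schema.map (fun p => PySem.Str.lower p.1)
    if col_names_lower.any (fun c => PySem.Str.isIn "city" c) then "city"
    else if col_names_lower.any (fun c => PySem.Str.isIn "district" c) then "district"
    else if col_names_lower.any (fun c => PySem.Str.isIn "state" c) then "state"
    else if col_names_lower.any (fun c => PySem.Str.isIn "country" c) then "country"
    else "state"

-- ===== PORT B =====
def pvKeywords : List String := ["state", "city", "district", "country", "region", "location"]

-- one column of B's single pass: add to `found` every keyword occurring in col_name.lower()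
def pvFoundStep (s : PySem.Set String) (p : String × String) : PySem.Set String :=
  let col_lower := PySem.Str.lower p.1
  pvKeywords.foldl (fun s kw => if PySem.Str.isIn kw col_lower then PySem.Set.add s kw else s) s

def detect_geographical_granularity_alt (schema : List (String × String)) (sample_rows : List (List (String × String))) : String :=
  let found : PySem.Set String := schema.foldl pvFoundStep PySem.Set.empty
  if found = [] then "national"
  else if PySem.Set.contains found "city" then "city"
  else if PySem.Set.contains found "district" then "district"
  else if PySem.Set.contains found "state" then "state"
  else if PySem.Set.contains found "country" then "country"
  else "state"

-- ===== PRECONDITION & SPEC =====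
def Spec_detect_geographical_granularity (schema : List (String × String)) (sample_rows : List (List (String × String))) (out : String) : Prop := out = detect_geographical_granularity_alt schema sample_rows
instance (schema : List (String × String)) (sample_rows : List (List (String × String))) (out : String) : Decidable (Spec_detect_geographical_granularity schema sample_rows out) := by unfold Spec_detect_geographical_granularity; infer_instance

-- ===== CLAIM (what is proved, stated in full; the proofs are below) =====
def Claim_equal_detect_geographical_granularity : Prop := ∀ (schema : List (String × String)) (sample_rows : List (List (String × String))), Dom_detect_geographical_granularity schema sample_rows → Spec_detect_geographical_granularity schema sample_rows (detect_geographical_granularity schema sample_rows)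

-- ===== LEMMAS AND PROOFS =====

-- membership in the inner keyword fold of pvFoundStep
lemma mem_foldl_add_if (ks : List String) (c : String → Bool) (s : PySem.Set String) (kw : String) :
    kw ∈ ks.foldl (fun s k => if c k then PySem.Set.add s k else s) s
      ↔ kw ∈ s ∨ (kw ∈ ks ∧ c kw = true) := by
  induction ks generalizing s with
  | nil => simp
  | cons k ks ih =>
    simp only [List.foldl_cons, ih, List.mem_cons]
    by_cases hc : c k
    · simp only [hc, if_true, PySem.Set.mem_add]
      constructor
      · rintro (⟨h | h⟩ | h)
        · exact Or.inl h
        · exact Or.inr ⟨Or.inl h, h ▸ hc⟩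
        · exact Or.inr ⟨Or.inr h.1, h.2⟩
      · rintro (h | ⟨h | h, h2⟩)
        · exact Or.inl (Or.inl h)
        · exact Or.inl (Or.inr h)
        · exact Or.inr ⟨h, h2⟩
    · simp only [hc]
      constructor
      · rintro (h | h)
        · exact Or.inl h
        · exact Or.inr ⟨Or.inr h.1, h.2⟩
      · rintro (h | ⟨h | h, h2⟩)
        · exact Or.inl h
        · exact absurd (h ▸ h2) (by simp [hc])
        · exact Or.inr ⟨h, h2⟩

-- membership in B's found set after the whole pass
lemma mem_found (schema : List (String × String)) (s : PySem.Set String) (kw : String) :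
    kw ∈ schema.foldl pvFoundStep s
      ↔ kw ∈ s ∨ (kw ∈ pvKeywords ∧
          schema.any (fun p => PySem.Str.isIn kw (PySem.Str.lower p.1)) = true) := by
  induction schema generalizing s with
  | nil => simp
  | cons p schema ih =>
    simp only [List.foldl_cons, ih, pvFoundStep, mem_foldl_add_if, List.any_cons, Bool.or_eq_true]
    by_cases hk : kw ∈ pvKeywords
    · simp only [hk, true_and]
      exact or_assoc
    · simp [hk]

-- B's branch conditions coincide with A's column scans
lemma cond_eq (schema : List (String × String)) (kw : String) (hk : kw ∈ pvKeywords) :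
    (schema.map (fun p => PySem.Str.lower p.1)).any (fun c => PySem.Str.isIn kw c)
      = PySem.Set.contains (schema.foldl pvFoundStep PySem.Set.empty) kw := by
  rw [Bool.eq_iff_iff, PySem.Set.contains_iff, mem_found]
  simp [PySem.Set.empty, hk, List.any_map]

-- A's gate and B's found set are empty together
lemma nil_iff (schema : List (String × String)) :
    (schema.foldl (fun acc (p : String × String) =>
        if pvKeywords.any (fun keyword => PySem.Str.isIn keyword (PySem.Str.lower p.1))
        then acc ++ [p.1] else acc) ([] : List String) = [])
      ↔ schema.foldl pvFoundStep PySem.Set.empty = [] := by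
  rw [PySem.List.foldl_append_if, List.nil_append, List.map_eq_nil_iff,
      List.filter_eq_nil_iff, List.eq_nil_iff_forall_not_mem]
  constructor
  · intro h kw hkw
    rcases (mem_found schema PySem.Set.empty kw).mp hkw with h0 | ⟨hk, hany⟩
    · simp [PySem.Set.empty] at h0
    · rcases List.any_eq_true.mp hany with ⟨p, hp, hi⟩
      exact h p hp (List.any_eq_true.mpr ⟨kw, hk, hi⟩)
  · intro h p hp hgate
    rcases List.any_eq_true.mp hgate with ⟨kw, hk, hi⟩
    exact h kw ((mem_found schema PySem.Set.empty kw).mpr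
      (Or.inr ⟨hk, List.any_eq_true.mpr ⟨p, hp, hi⟩⟩))

-- ===== VERDICT (by name: the statement is the Claim_ definition above) =====
theorem detect_geographical_granularity_spec : Claim_equal_detect_geographical_granularity := by
  intro schema sample_rows _
  unfold Spec_detect_geographical_granularity
  unfold detect_geographical_granularity detect_geographical_granularity_alt
  simp only []
  have hlist : (["state", "city", "district", "country", "region", "location"] : List String) = pvKeywords := rfl
  rw [hlist, cond_eq schema "city" (by decide), cond_eq schema "district" (by decide),
      cond_eq schema "state" (by decide), cond_eq schema "country" (by decide)]
  by_cases h : schema.foldl pvFoundStep PySem.Set.empty = []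
  · rw [if_pos ((nil_iff schema).mpr h), if_pos h]
  · rw [if_neg (fun hc => h ((nil_iff schema).mp hc)), if_neg h]
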